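-- pv_equiv track=rewrite | github.com/reyncode/rinkrat | rinkrat/order.py | order_by_division
-- ===== SOURCE A (Python) =====
-- from typing import List
--
-- def order_by_division(teams: List) -> dict:
--     atlantic = []
--     metropolitan = []
--     central = []
--     pacific = []
--
--     for team in teams:
--
--         if team['divisionName'] == 'Atlantic':
--             atlantic.append(team)
--
--         elif team['divisionName'] == 'Metropolitan':
--             metropolitan.append(team)
--
--         elif team['divisionName'] == 'Central':
--             central.append(team)
--
--         elif team['divisionName'] == 'Pacific':
--             pacific.append(team)
--
--     result = dict()
--     result['atlantic'] = atlantic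
--     result['metropolitan'] = metropolitan
--     result['central'] = central
--     result['pacific'] = pacific
--
--     return result
-- ===== SOURCE B (Python) =====
-- from typing import List
--
-- def order_by_division(teams: List) -> dict:
--     divisions = [('Atlantic', 'atlantic'), ('Metropolitan', 'metropolitan'),
--                  ('Central', 'central'), ('Pacific', 'pacific')]
--     return {key: [team for team in teams if team['divisionName'] == name]
--             for name, key in divisions}
-- ===== Notes on version B (the rewrite author's own statement) =====
-- stated objective: idiomatic
-- what changed: Replaces A's single pass that appends into four named accumulator lists via an if/elif cascade with a dict comprehension that makes one independent filter pass over teams per division bucket.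
import Mathlib
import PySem

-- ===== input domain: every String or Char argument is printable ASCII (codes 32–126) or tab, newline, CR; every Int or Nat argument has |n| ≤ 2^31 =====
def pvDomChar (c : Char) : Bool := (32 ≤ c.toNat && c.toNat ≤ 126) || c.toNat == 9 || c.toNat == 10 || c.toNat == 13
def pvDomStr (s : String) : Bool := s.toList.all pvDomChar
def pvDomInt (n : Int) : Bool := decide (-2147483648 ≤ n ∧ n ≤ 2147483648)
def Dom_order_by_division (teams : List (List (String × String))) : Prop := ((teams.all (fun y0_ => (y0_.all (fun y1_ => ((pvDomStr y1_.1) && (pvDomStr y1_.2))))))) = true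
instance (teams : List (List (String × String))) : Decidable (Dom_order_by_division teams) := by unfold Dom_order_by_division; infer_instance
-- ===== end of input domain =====

-- B replaces A's single accumulating pass (four named lists, if/elif cascade) with one
-- independent filter pass per division bucket, built by a dict comprehension (idiomatic).

-- ===== PORT A =====
-- team['divisionName'] : dict lookup (first match); getD is used for totality, Pre_ excludes the missing-key KeyError
def pvDivName (team : List (String × String)) : String :=
  PySem.Dict.getD (PySem.Dict.mk team) "divisionName" ""

def order_by_division (teams : List (List (String × String))) : List (String × List (List (String × String))) :=
  let st := teams.foldl
    (fun (st : List (List (String × String)) × List (List (String × String)) × List (List (String × String)) × List (List (String × String))) team =>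
      let (atlantic, metropolitan, central, pacific) := st
      if pvDivName team = "Atlantic" then (atlantic ++ [team], metropolitan, central, pacific)
      else if pvDivName team = "Metropolitan" then (atlantic, metropolitan ++ [team], central, pacific)
      else if pvDivName team = "Central" then (atlantic, metropolitan, central ++ [team], pacific)
      else if pvDivName team = "Pacific" then (atlantic, metropolitan, central, pacific ++ [team])
      else st)
    ([], [], [], [])
  [("atlantic", st.1), ("metropolitan", st.2.1), ("central", st.2.2.1), ("pacific", st.2.2.2)]

-- ===== PORT B =====
def pvDivisions : List (String × String) :=
  [("Atlantic", "atlantic"), ("Metropolitan", "metropolitan"),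
   ("Central", "central"), ("Pacific", "pacific")]

def order_by_division_alt (teams : List (List (String × String))) : List (String × List (List (String × String))) :=
  pvDivisions.map (fun nk => (nk.2, teams.filter (fun team => pvDivName team == nk.1)))

-- ===== PRECONDITION & SPEC =====
-- Pre_ excludes teams missing the 'divisionName' key, where the Python A raises KeyError.
def Pre_order_by_division (teams : List (List (String × String))) : Prop :=
  ∀ team ∈ teams, (PySem.Dict.mk team).contains "divisionName" = true
instance (teams : List (List (String × String))) : Decidable (Pre_order_by_division teams) := by unfold Pre_order_by_division; infer_instance

def pvWitness_order_by_division : (List (List (String × String))) :=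
  [[("divisionName", "Atlantic"), ("name", "Boston")], [("divisionName", "Pacific")], [("divisionName", "Nope")]]

def Spec_order_by_division (teams : List (List (String × String))) (out : List (String × List (List (String × String)))) : Prop := out = order_by_division_alt teams
instance (teams : List (List (String × String))) (out : List (String × List (List (String × String)))) : Decidable (Spec_order_by_division teams out) := by unfold Spec_order_by_division; infer_instance

-- ===== CLAIM (what is proved, stated in full; the proofs are below) =====
def Claim_equal_order_by_division : Prop := ∀ (teams : List (List (String × String))), Dom_order_by_division teams → Pre_order_by_division teams → Spec_order_by_division teams (order_by_division teams)

-- ===== LEMMAS AND PROOFS =====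

-- A's fold state is the accumulators extended with the per-division filters of the remaining teams.
theorem order_by_division_loop (teams : List (List (String × String)))
    (a m c p : List (List (String × String))) :
    teams.foldl
      (fun (st : List (List (String × String)) × List (List (String × String)) × List (List (String × String)) × List (List (String × String))) team =>
        let (atlantic, metropolitan, central, pacific) := st
        if pvDivName team = "Atlantic" then (atlantic ++ [team], metropolitan, central, pacific)
        else if pvDivName team = "Metropolitan" then (atlantic, metropolitan ++ [team], central, pacific)
        else if pvDivName team = "Central" then (atlantic, metropolitan, central ++ [team], pacific)
        else if pvDivName team = "Pacific" then (atlantic, metropolitan, central, pacific ++ [team])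
        else st)
      (a, m, c, p)
    = (a ++ teams.filter (fun t => pvDivName t == "Atlantic"),
       m ++ teams.filter (fun t => pvDivName t == "Metropolitan"),
       c ++ teams.filter (fun t => pvDivName t == "Central"),
       p ++ teams.filter (fun t => pvDivName t == "Pacific")) := by
  induction teams generalizing a m c p with
  | nil => simp
  | cons t ts ih =>
    simp only [List.foldl_cons, List.filter_cons]
    by_cases h1 : pvDivName t = "Atlantic"
    · simp [h1, ih]
    · by_cases h2 : pvDivName t = "Metropolitan"
      · simp [h1, h2, ih]
      · by_cases h3 : pvDivName t = "Central"
        · simp [h1, h2, h3, ih]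
        · by_cases h4 : pvDivName t = "Pacific"
          · simp [h1, h2, h3, h4, ih]
          · simp [h1, h2, h3, h4, ih]

-- ===== VERDICT (by name: the statement is the Claim_ definition above) =====
theorem order_by_division_spec : Claim_equal_order_by_division := by
  intro teams _ _
  show order_by_division teams = order_by_division_alt teams
  unfold order_by_division order_by_division_alt pvDivisions
  rw [order_by_division_loop]
  simp [List.map]
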